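-- pv_equiv track=rewrite | github.com/joe-molitoris/Advent-of-Code | 2015/Day 1/Solution.py | enters_basement
-- ===== SOURCE A (Python) =====
-- def enters_basement(data:str) -> int:
--     '''
--     Determine the index of the move in which Santa enters basement.
--     '''
--     # Keeps track of current floor
--     current_floor=0
--     # Defines the character values
--     code = {"(":1, ")":-1}
--     # Creates list of tuples with the position and character value
--     translation = list(enumerate([code[i] for i in data], start=1))
--     # Loops over characters until the basement is reached
--     for i in translation:
--         current_floor+=i[1]
--         if current_floor<0:
--             return i[0]
-- ===== SOURCE B (Python) =====
-- def enters_basement(data: str) -> int: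
--     '''
--     Determine the index of the move in which Santa enters basement.
--     '''
--     # Table saying whether a character opens a new level (KeyError on anything else).
--     opens = {"(": True, ")": False}
--     # Stack of positions of currently unmatched '(' characters: its depth is the
--     # current floor, so Santa first enters the basement exactly at the first ')'
--     # that finds the stack empty.
--     stack = []
--     for pos, c in enumerate(data, 1):
--         if opens[c]:
--             stack.append(pos)
--         elif stack:
--             stack.pop()
--         else:
--             return pos
--     return None
-- ===== Notes on version B (the rewrite author's own statement) =====
-- stated objective: alternative
-- what changed: B replaces A's running-sum-with-threshold loop by a parenthesis-matching stack of open positions: it pushes '(' positions, pops on ')', and returns the position of the first ')' that finds the stack empty (the stack depth equals the current floor, so emptiness at a ')' is exactly the floor going negative).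
import Mathlib
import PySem

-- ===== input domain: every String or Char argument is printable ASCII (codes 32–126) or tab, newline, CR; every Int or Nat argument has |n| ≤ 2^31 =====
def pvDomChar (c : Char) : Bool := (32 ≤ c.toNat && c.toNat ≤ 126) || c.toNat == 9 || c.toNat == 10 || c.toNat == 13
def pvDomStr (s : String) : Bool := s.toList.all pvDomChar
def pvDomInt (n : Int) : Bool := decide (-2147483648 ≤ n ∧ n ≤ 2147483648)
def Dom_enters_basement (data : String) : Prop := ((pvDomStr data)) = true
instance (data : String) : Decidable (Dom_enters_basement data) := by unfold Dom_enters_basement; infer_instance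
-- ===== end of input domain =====

-- B replaces A's running-sum loop by a parenthesis-matching stack of open positions (same O(n) cost).

-- ===== PORT A =====
-- code[i]: exact on Pre_ (every char is '(' or ')'); Python raises KeyError otherwise, excluded by Pre_.
def pvCode (c : Char) : Int := if c = '(' then 1 else -1

-- the 'for i in translation: current_floor += i[1]; if current_floor < 0: return i[0]' loop
def pvLoopA : List (Int × Int) → Int → Option Int
  | [], _ => none
  | i :: rest, current_floor =>
    let cf := current_floor + i.2
    if cf < 0 then some i.1 else pvLoopA rest cf

def enters_basement (data : String) : Option Int :=
  let translation := PySem.List.enumerate (data.toList.map pvCode) 1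
  pvLoopA translation 0

-- ===== PORT B =====
-- Source B's loop: opens[c] ported as 'c = (' — exact on Pre_ (Python raises KeyError on other chars,
-- excluded by Pre_); push '(' positions, pop on ')', return the position of the first unmatched ')'
def pvLoopB : List (Int × Char) → List Int → Option Int
  | [], _ => none
  | (pos, c) :: rest, stack =>
    if c = '(' then pvLoopB rest (pos :: stack)
    else match stack with
      | _ :: s => pvLoopB rest s
      | [] => some pos

def enters_basement_alt (data : String) : Option Int :=
  pvLoopB (PySem.List.enumerate data.toList 1) []

-- ===== PRECONDITION & SPEC =====
-- Pre_ excludes exactly the strings containing a character other than '(' or ')', on which A raises KeyError.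
def Pre_enters_basement (data : String) : Prop :=
  (data.toList.all (fun c => c = '(' || c = ')')) = true
instance (data : String) : Decidable (Pre_enters_basement data) := by
  unfold Pre_enters_basement; infer_instance
def pvWitness_enters_basement : String := "())"

def Spec_enters_basement (data : String) (out : Option Int) : Prop := out = enters_basement_alt data
instance (data : String) (out : Option Int) : Decidable (Spec_enters_basement data out) := by unfold Spec_enters_basement; infer_instance

-- ===== CLAIM (what is proved, stated in full; the proofs are below) =====
def Claim_equal_enters_basement : Prop := ∀ (data : String), Dom_enters_basement data → Pre_enters_basement data → Spec_enters_basement data (enters_basement data)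

-- ===== LEMMAS AND PROOFS =====
-- Invariant: the stack depth of B's loop equals A's running floor, so A's 'floor < 0'
-- test fires exactly when B pops from an empty stack. Holds for every char list.
theorem pvLoopA_eq_loopB (cs : List Char) (start : Int) (stack : List Int) :
    pvLoopA (PySem.List.enumerate (cs.map pvCode) start) (stack.length : Int)
      = pvLoopB (PySem.List.enumerate cs start) stack := by
  induction cs generalizing start stack with
  | nil => simp [PySem.List.enumerate_nil, pvLoopA, pvLoopB]
  | cons c rest ih =>
      simp only [List.map_cons, PySem.List.enumerate_cons, pvLoopA, pvLoopB, pvCode]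
      by_cases hc : c = '('
      · simp only [hc, if_true]
        have hlt : ¬ ((stack.length : Int) + 1 < 0) := by omega
        simp only [if_neg hlt]
        have := ih (start + 1) (start :: stack)
        simpa [List.length_cons, Int.natCast_add] using this
      · simp only [hc, if_false]
        cases stack with
        | nil => simp
        | cons x s =>
            have hlt : ¬ ((((x :: s).length : Int)) + (-1) < 0) := by
              simp [List.length_cons]
            simp only [if_neg hlt]
            have := ih (start + 1) s
            have hcast : ((((x :: s).length : Int)) + (-1)) = (s.length : Int) := by
              simp [List.length_cons]
            rw [hcast]
            exact this

-- ===== VERDICT (by name: the statement is the Claim_ definition above) =====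
theorem enters_basement_spec : Claim_equal_enters_basement := by
  intro data _ _
  unfold Spec_enters_basement enters_basement enters_basement_alt
  simpa using pvLoopA_eq_loopB data.toList 1 []
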